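-- pv_equiv track=rewrite | github.com/pypi-data/pypi-mirror-401 | packages/stanlogic/stanlogic-2.1.0-py3-none-any.whl/stanlogic/kmapsolver3D.py | _can_combine_extra_vars
-- ===== SOURCE A (Python) =====
-- def _can_combine_extra_vars(extra_combos):
--     """
--     Check if extra variable combinations form a valid power-of-2 group.
--     """
--     if len(extra_combos) <= 1:
--         return False
--
--     # Count must be power of 2
--     if len(extra_combos) & (len(extra_combos) - 1) != 0:
--         return False
--
--     if not extra_combos:
--         return False
--
--     # Find varying bit positions
--     varying_positions = []
--     bits = list(extra_combos[0])
--     for combo in extra_combos[1:]: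
--         for i in range(len(bits)):
--             if bits[i] != combo[i] and i not in varying_positions:
--                 varying_positions.append(i)
--
--     # Must vary in exactly log2(count) positions
--     expected_varying = len(extra_combos).bit_length() - 1
--     return len(varying_positions) == expected_varying
-- ===== SOURCE B (Python) =====
-- def _can_combine_extra_vars(extra_combos):
--     """
--     Check if extra variable combinations form a valid power-of-2 group.
--     """
--     n = len(extra_combos)
--     if n <= 1 or n & (n - 1) != 0:
--         return False
--
--     first = extra_combos[0]
--     # Per-column distinct-character sets (no reference row): a column varies
--     # exactly when it holds more than one distinct character.
--     columns = [{combo[i] for combo in extra_combos} for i in range(len(first))]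
--     varying = sum(1 for col in columns if len(col) > 1)
--     return varying == n.bit_length() - 1
-- ===== Notes on version B (the rewrite author's own statement) =====
-- stated objective: simpler
-- what changed: Drops A's reference-row scan that appends differing positions to a dedup list (with an 'i not in list' membership test); B instead builds the set of distinct characters of each column and counts the columns whose set has more than one element.
import Mathlib
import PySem

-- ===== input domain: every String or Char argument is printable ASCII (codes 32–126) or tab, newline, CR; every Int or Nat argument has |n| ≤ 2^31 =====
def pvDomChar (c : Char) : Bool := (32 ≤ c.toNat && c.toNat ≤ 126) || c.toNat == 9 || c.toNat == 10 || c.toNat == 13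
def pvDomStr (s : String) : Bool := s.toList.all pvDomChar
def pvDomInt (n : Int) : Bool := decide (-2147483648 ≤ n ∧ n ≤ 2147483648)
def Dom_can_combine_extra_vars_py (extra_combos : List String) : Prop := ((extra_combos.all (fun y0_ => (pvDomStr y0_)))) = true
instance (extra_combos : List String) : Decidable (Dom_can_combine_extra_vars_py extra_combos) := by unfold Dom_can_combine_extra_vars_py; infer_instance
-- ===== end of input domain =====

-- B replaces A's reference-row scan (appending differing positions to a dedup list) by
-- per-column distinct-character sets: a column varies iff its set has more than one element
-- (objective: simpler; same return value on Pre_).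

-- ===== PORT A =====
-- one inner-loop step of A: if bits[i] != combo[i] and i not in varying_positions: append i
-- (out-of-range index = Python IndexError; Pre_ excludes it, the fallthrough arm is unreachable there)
def pvStepA (bits cs : List Char) (vp : List Nat) (i : Nat) : List Nat :=
  match bits[i]?, cs[i]? with
  | some b, some c => if b ≠ c ∧ i ∉ vp then vp ++ [i] else vp
  | _, _ => vp

def can_combine_extra_vars_py (extra_combos : List String) : Bool :=
  if extra_combos.length ≤ 1 then false
  else if extra_combos.length &&& (extra_combos.length - 1) ≠ 0 then false
  else if extra_combos = [] then false
  else
    let bits := (extra_combos.headI).toList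
    let varying := (extra_combos.drop 1).foldl
      (fun vp combo => (List.range bits.length).foldl (pvStepA bits combo.toList) vp)
      ([] : List Nat)
    let expected := PySem.Int.bitLength (extra_combos.length : Int) - 1
    decide (varying.length = expected)

-- ===== PORT B =====
def can_combine_extra_vars_py_alt (extra_combos : List String) : Bool :=
  let n := extra_combos.length
  if n ≤ 1 ∨ n &&& (n - 1) ≠ 0 then false
  else
    let first := (extra_combos.headI).toList
    -- combo[i] on an out-of-range i is a Python IndexError; Pre_ excludes it (getD arm unreachable there)
    let columns := (List.range first.length).map (fun i =>
      PySem.Set.ofList (extra_combos.map (fun combo => (combo.toList)[i]?.getD ' ')))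
    let varying := (columns.filter (fun col => 1 < col.length)).length
    decide (varying = PySem.Int.bitLength (n : Int) - 1)

-- ===== PRECONDITION & SPEC =====
-- Pre_ excludes exactly the ragged inputs on which A raises IndexError (a combo after the first
-- shorter than the first while the length guards pass); A returns normally everywhere else.
def Pre_can_combine_extra_vars_py (extra_combos : List String) : Prop :=
  extra_combos.length ≤ 1 ∨ extra_combos.length &&& (extra_combos.length - 1) ≠ 0 ∨
    ∀ s ∈ extra_combos.drop 1, (extra_combos.headI).toList.length ≤ s.toList.length
instance (extra_combos : List String) : Decidable (Pre_can_combine_extra_vars_py extra_combos) := by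
  unfold Pre_can_combine_extra_vars_py; infer_instance

def pvWitness_can_combine_extra_vars_py : List String := ["00", "01", "10", "11"]

def Spec_can_combine_extra_vars_py (extra_combos : List String) (out : Bool) : Prop := out = can_combine_extra_vars_py_alt extra_combos
instance (extra_combos : List String) (out : Bool) : Decidable (Spec_can_combine_extra_vars_py extra_combos out) := by unfold Spec_can_combine_extra_vars_py; infer_instance

-- ===== CLAIM (what is proved, stated in full; the proofs are below) =====
def Claim_equal_can_combine_extra_vars_py : Prop := ∀ (extra_combos : List String), Dom_can_combine_extra_vars_py extra_combos → Pre_can_combine_extra_vars_py extra_combos → Spec_can_combine_extra_vars_py extra_combos (can_combine_extra_vars_py extra_combos)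

-- ===== LEMMAS AND PROOFS =====

-- 'position i is a varying column for combo cs' (both indices in range and characters differ)
def pvDiffAt (bits cs : List Char) (i : Nat) : Bool :=
  match bits[i]?, cs[i]? with
  | some b, some c => b ≠ c
  | _, _ => false

lemma pvDiffAt_lt {bits cs : List Char} {i : Nat} (h : pvDiffAt bits cs i = true) :
    i < bits.length := by
  unfold pvDiffAt at h
  by_cases hi : i < bits.length
  · exact hi
  · simp [List.getElem?_eq_none (le_of_not_gt hi)] at h

lemma mem_pvStepA {bits cs : List Char} {vp : List Nat} {i j : Nat} :
    j ∈ pvStepA bits cs vp i ↔ j ∈ vp ∨ (j = i ∧ pvDiffAt bits cs i = true) := by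
  unfold pvStepA pvDiffAt
  cases hb : bits[i]? with
  | none => simp
  | some b =>
    cases hc : cs[i]? with
    | none => simp
    | some c =>
      dsimp only
      split_ifs with h
      · simp [List.mem_append, h.1]
      · by_cases hbc : b = c
        · simp [hbc]
        · have hmem : i ∈ vp := by
            by_contra hm; exact h ⟨hbc, hm⟩
          simp only [ne_eq, hbc, not_false_iff, decide_true, and_true]
          exact ⟨Or.inl, fun hv => hv.elim id (fun he => he ▸ hmem)⟩

lemma nodup_pvStepA {bits cs : List Char} {vp : List Nat} {i : Nat} (h : vp.Nodup) :
    (pvStepA bits cs vp i).Nodup := by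
  unfold pvStepA
  cases bits[i]? with
  | none => exact h
  | some b =>
    cases cs[i]? with
    | none => exact h
    | some c =>
      dsimp only
      split_ifs with hc
      · exact h.append (List.nodup_singleton i)
          (fun a ha hai => hc.2 ((List.mem_singleton.mp hai) ▸ ha))
      · exact h

lemma mem_foldl_pvStepA (bits cs : List Char) (L : List Nat) (vp : List Nat) (j : Nat) :
    j ∈ L.foldl (pvStepA bits cs) vp ↔ j ∈ vp ∨ (j ∈ L ∧ pvDiffAt bits cs j = true) := by
  induction L generalizing vp with
  | nil => simp
  | cons i L ih =>
    rw [List.foldl_cons, ih, mem_pvStepA]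
    constructor
    · rintro ((h | ⟨rfl, hd⟩) | ⟨hL, hd⟩)
      · exact Or.inl h
      · exact Or.inr ⟨List.mem_cons_self, hd⟩
      · exact Or.inr ⟨List.mem_cons_of_mem _ hL, hd⟩
    · rintro (h | ⟨hL, hd⟩)
      · exact Or.inl (Or.inl h)
      · rcases List.mem_cons.mp hL with rfl | hL
        · exact Or.inl (Or.inr ⟨rfl, hd⟩)
        · exact Or.inr ⟨hL, hd⟩

lemma nodup_foldl_pvStepA (bits cs : List Char) (L : List Nat) (vp : List Nat) (h : vp.Nodup) :
    (L.foldl (pvStepA bits cs) vp).Nodup := by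
  induction L generalizing vp with
  | nil => exact h
  | cons i L ih => exact ih _ (nodup_pvStepA h)

-- membership in A's outer accumulation: some processed combo differs at j
lemma mem_outerA (bits : List Char) (tail : List String) (vp : List Nat) (j : Nat) :
    j ∈ tail.foldl (fun vp combo => (List.range bits.length).foldl (pvStepA bits combo.toList) vp) vp ↔
      j ∈ vp ∨ ∃ c ∈ tail, pvDiffAt bits c.toList j = true := by
  induction tail generalizing vp with
  | nil => simp
  | cons c tail ih =>
    rw [List.foldl_cons, ih]
    rw [mem_foldl_pvStepA]
    constructor
    · rintro ((h | ⟨_, hd⟩) | ⟨c', hc', hd⟩)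
      · exact Or.inl h
      · exact Or.inr ⟨c, List.mem_cons_self, hd⟩
      · exact Or.inr ⟨c', List.mem_cons_of_mem _ hc', hd⟩
    · rintro (h | ⟨c', hc', hd⟩)
      · exact Or.inl (Or.inl h)
      · rcases List.mem_cons.mp hc' with rfl | hc'
        · exact Or.inl (Or.inr ⟨pvDiffAt_lt hd |> List.mem_range.mpr, hd⟩)
        · exact Or.inr ⟨c', hc', hd⟩

lemma nodup_outerA (bits : List Char) (tail : List String) (vp : List Nat) (h : vp.Nodup) :
    (tail.foldl (fun vp combo => (List.range bits.length).foldl (pvStepA bits combo.toList) vp) vp).Nodup := by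
  induction tail generalizing vp with
  | nil => exact h
  | cons c tail ih => exact ih _ (nodup_foldl_pvStepA _ _ _ _ h)

-- a nodup list with all members equal has at most one element
lemma pvLenLeOne {α : Type} {S : List α} {a : α} (hnd : S.Nodup) (hall : ∀ x ∈ S, x = a) :
    S.length ≤ 1 := by
  match S, hnd, hall with
  | [], _, _ => simp
  | [x], _, _ => simp
  | x :: y :: t, hnd, hall =>
    exfalso
    have hx : x = a := hall x List.mem_cons_self
    have hy : y = a := hall y (List.mem_cons_of_mem _ List.mem_cons_self)
    exact (List.nodup_cons.mp hnd).1 (by rw [hx, ← hy]; exact List.mem_cons_self)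

-- a list with two distinct members has more than one element
lemma pvOneLtLen {α : Type} {S : List α} {a b : α} (ha : a ∈ S) (hb : b ∈ S) (hne : a ≠ b) :
    1 < S.length := by
  match S, ha, hb with
  | [x], ha, hb =>
    exact absurd ((List.mem_singleton.mp ha).trans (List.mem_singleton.mp hb).symm) hne
  | x :: y :: t, _, _ => simp

-- cardinality of a column set: set(a :: l) has > 1 element iff some element of l differs from a
lemma pvSetCard {a : Char} {l : List Char} :
    1 < (PySem.Set.ofList (a :: l)).length ↔ ∃ b ∈ l, b ≠ a := by
  constructor
  · intro h
    by_contra hno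
    push Not at hno
    have hall : ∀ x ∈ PySem.Set.ofList (a :: l), x = a := by
      intro x hx
      rcases List.mem_cons.mp ((PySem.Set.mem_ofList _ _).mp hx) with rfl | hx
      · rfl
      · exact hno x hx
    exact absurd (pvLenLeOne (PySem.Set.nodup_ofList _) hall) (by omega)
  · rintro ⟨b, hb, hne⟩
    exact pvOneLtLen ((PySem.Set.mem_ofList _ _).mpr (List.mem_cons_of_mem _ hb))
      ((PySem.Set.mem_ofList _ _).mpr List.mem_cons_self) hne

-- ===== VERDICT (by name: the statement is the Claim_ definition above) =====
theorem can_combine_extra_vars_py_spec : Claim_equal_can_combine_extra_vars_py := by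
  intro xs _ hpre
  unfold Spec_can_combine_extra_vars_py can_combine_extra_vars_py can_combine_extra_vars_py_alt
  by_cases h1 : xs.length ≤ 1
  · simp [h1]
  · by_cases h2 : xs.length &&& (xs.length - 1) ≠ 0
    · simp [h1, h2]
    · have hne : xs ≠ [] := by
        intro h; rw [h] at h1; simp at h1
      rcases hpre with hp | hp | hp
      · exact absurd hp h1
      · exact absurd hp h2
      · -- hp : every tail combo is at least as long as the first
        simp only [if_neg h1, if_neg h2, if_neg hne, if_neg (not_or.mpr ⟨h1, h2⟩)]
        set bits := (xs.headI).toList with hbits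
        set tail := xs.drop 1 with htail
        have hxs : xs = xs.headI :: tail := by
          cases xs with
          | nil => exact absurd rfl hne
          | cons x t => simp [htail]
        -- B's column list: filter of a map = map of a filter on range
        rw [List.filter_map, List.length_map]
        -- rewrite B's predicate on each in-range position to A's 'some tail combo differs'
        have hfiltercongr :
            (List.range bits.length).filter
              ((fun col => 1 < List.length col) ∘ (fun i =>
                PySem.Set.ofList (xs.map (fun combo => (combo.toList)[i]?.getD ' ')))) =
            (List.range bits.length).filter (fun i =>
              tail.any (fun combo => pvDiffAt bits combo.toList i)) := by
          apply List.filter_congr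
          intro i hi
          rw [List.mem_range] at hi
          have hcol : xs.map (fun combo => (combo.toList)[i]?.getD ' ') =
              bits[i]'hi :: tail.map (fun combo => (combo.toList)[i]?.getD ' ') := by
            conv_lhs => rw [hxs]
            rw [List.map_cons]
            simp only [← hbits]
            simp [List.getElem?_eq_getElem hi]
          simp only [Function.comp_apply, hcol]
          rw [List.any_eq, decide_eq_decide, pvSetCard]
          constructor
          · rintro ⟨b, hb, hne⟩
            rcases List.mem_map.mp hb with ⟨c, hc, rfl⟩
            refine ⟨c, hc, ?_⟩
            have hlen : i < c.toList.length := lt_of_lt_of_le hi (hp c (htail ▸ hc))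
            unfold pvDiffAt
            simp only [List.getElem?_eq_getElem hi, List.getElem?_eq_getElem hlen,
              ne_eq, decide_eq_true_eq]
            intro h
            exact hne (by simp [List.getElem?_eq_getElem hlen, h])
          · rintro ⟨c, hc, hd⟩
            have hlen : i < c.toList.length := lt_of_lt_of_le hi (hp c (htail ▸ hc))
            unfold pvDiffAt at hd
            simp only [List.getElem?_eq_getElem hi, List.getElem?_eq_getElem hlen,
              ne_eq, decide_eq_true_eq] at hd
            refine ⟨(c.toList)[i]?.getD ' ', List.mem_map.mpr ⟨c, hc, rfl⟩, ?_⟩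
            simp only [List.getElem?_eq_getElem hlen, Option.getD_some, ne_eq]
            exact fun h => hd h.symm
        rw [hfiltercongr]
        -- A's accumulated position list is a permutation of that filter
        have hmemA : ∀ j, j ∈ tail.foldl
            (fun vp combo => (List.range bits.length).foldl (pvStepA bits combo.toList) vp) [] ↔
            ∃ c ∈ tail, pvDiffAt bits c.toList j = true := by
          intro j; rw [mem_outerA]; simp
        have hmemB : ∀ j, j ∈ (List.range bits.length).filter (fun i =>
              tail.any (fun combo => pvDiffAt bits combo.toList i)) ↔
            ∃ c ∈ tail, pvDiffAt bits c.toList j = true := by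
          intro j
          simp only [List.mem_filter, List.mem_range, List.any_eq, decide_eq_true_eq]
          constructor
          · rintro ⟨_, c, hc, hd⟩; exact ⟨c, hc, hd⟩
          · rintro ⟨c, hc, hd⟩; exact ⟨pvDiffAt_lt hd, c, hc, hd⟩
        have hperm : (tail.foldl
            (fun vp combo => (List.range bits.length).foldl (pvStepA bits combo.toList) vp) []).Perm
            ((List.range bits.length).filter (fun i =>
              tail.any (fun combo => pvDiffAt bits combo.toList i))) := by
          rw [List.perm_ext_iff_of_nodup (nodup_outerA _ _ _ List.nodup_nil)
            (List.Nodup.filter _ (List.nodup_range))]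
          intro j; rw [hmemA, hmemB]
        rw [hperm.length_eq]
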